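-- pv_equiv track=rewrite | github.com/gravvy23/Python | generators/generators.py | gen2
-- ===== SOURCE A (Python) =====
-- def gen2(sekw, parametr = 1):
--     i=0
--     for x in sekw:
--         if parametr:
--             if not i%2:
--                 yield x
--         else:
--             if i%2:
--                 yield x
--         i=i+1
-- ===== SOURCE B (Python) =====
-- import itertools
--
-- def gen2(sekw, parametr=1):
--     yield from itertools.islice(sekw, 0 if parametr else 1, None, 2)
-- ===== Notes on version B (the rewrite author's own statement) =====
-- stated objective: idiomatic
-- what changed: Replaces the manual counter with a per-element parity branch by a single itertools.islice call with a start offset (0 if parametr truthy else 1) and step 2.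
import Mathlib
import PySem

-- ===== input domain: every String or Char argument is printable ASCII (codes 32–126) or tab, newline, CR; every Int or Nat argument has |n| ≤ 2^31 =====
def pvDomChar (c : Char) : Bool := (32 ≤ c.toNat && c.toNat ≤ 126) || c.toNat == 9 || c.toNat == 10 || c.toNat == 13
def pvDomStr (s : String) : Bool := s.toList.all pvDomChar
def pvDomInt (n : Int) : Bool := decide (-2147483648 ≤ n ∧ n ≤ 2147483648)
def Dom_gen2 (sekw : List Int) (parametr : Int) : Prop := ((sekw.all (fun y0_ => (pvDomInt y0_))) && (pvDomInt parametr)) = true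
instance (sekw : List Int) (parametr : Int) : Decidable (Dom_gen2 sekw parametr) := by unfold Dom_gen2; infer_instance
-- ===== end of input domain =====

-- B selects with islice(start = 0 or 1, step 2) instead of A's counter + parity branch; same values, idiomatic form.
-- ===== PORT A =====
-- the generator's loop: counter i, parity branch per element
def gen2Aux (parametr : Int) : List Int → Int → List Int
  | [], _ => []
  | x :: xs, i =>
    (if parametr ≠ 0 then
       (if ¬ (i % 2 ≠ 0) then [x] else [])
     else
       (if i % 2 ≠ 0 then [x] else [])) ++ gen2Aux parametr xs (i + 1)

def gen2 (sekw : List Int) (parametr : Int) : List Int := gen2Aux parametr sekw 0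

-- ===== PORT B =====
-- islice(_, start, None, 2): drop `start` elements, then take every second one
def everyOther : List Int → List Int
  | [] => []
  | [x] => [x]
  | x :: _ :: xs => x :: everyOther xs

def gen2_alt (sekw : List Int) (parametr : Int) : List Int :=
  everyOther (sekw.drop (if parametr ≠ 0 then 0 else 1))

-- ===== PRECONDITION & SPEC =====
def Spec_gen2 (sekw : List Int) (parametr : Int) (out : List Int) : Prop := out = gen2_alt sekw parametr
instance (sekw : List Int) (parametr : Int) (out : List Int) : Decidable (Spec_gen2 sekw parametr out) := by unfold Spec_gen2; infer_instance

-- ===== CLAIM (what is proved, stated in full; the proofs are below) =====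
def Claim_equal_gen2 : Prop := ∀ (sekw : List Int) (parametr : Int), Dom_gen2 sekw parametr → Spec_gen2 sekw parametr (gen2 sekw parametr)

-- ===== LEMMAS AND PROOFS =====
theorem gen2Aux_ne_even (p : Int) (hp : p ≠ 0) :
    ∀ xs : List Int, ∀ i : Int, i % 2 = 0 → gen2Aux p xs i = everyOther xs := by
  intro xs
  induction xs using everyOther.induct with
  | case1 => intro i _; rfl
  | case2 x => intro i hi; simp [gen2Aux, everyOther, hp, hi]
  | case3 x y xs ih =>
    intro i hi
    have h1 : (i + 1) % 2 = 1 := by omega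
    have h2 : (i + 2) % 2 = 0 := by omega
    simp [gen2Aux, everyOther, hp, hi, h1, show i + 1 + 1 = i + 2 by ring, ih _ h2]

theorem gen2Aux_zero_odd :
    ∀ xs : List Int, ∀ i : Int, i % 2 = 1 → gen2Aux 0 xs i = everyOther xs := by
  intro xs
  induction xs using everyOther.induct with
  | case1 => intro i _; rfl
  | case2 x => intro i hi; simp [gen2Aux, everyOther, hi]
  | case3 x y xs ih =>
    intro i hi
    have h1 : (i + 1) % 2 = 0 := by omega
    have h2 : (i + 2) % 2 = 1 := by omega
    simp [gen2Aux, everyOther, hi, h1, show i + 1 + 1 = i + 2 by ring, ih _ h2]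

-- ===== VERDICT (by name: the statement is the Claim_ definition above) =====
theorem gen2_spec : Claim_equal_gen2 := by
  intro sekw parametr _
  unfold Spec_gen2 gen2 gen2_alt
  by_cases hp : parametr ≠ 0
  · simp [hp, gen2Aux_ne_even parametr hp sekw 0 rfl]
  · rw [not_not] at hp
    subst hp
    simp only [ne_eq, not_true_eq_false, if_false]
    cases sekw with
    | nil => rfl
    | cons x xs =>
      show gen2Aux 0 (x :: xs) 0 = everyOther xs
      simp [gen2Aux, gen2Aux_zero_odd xs 1 rfl]
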